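-- pv_equiv track=rewrite | github.com/LeungLoh/algorithm | CD10 未排序数组中累加和为给定值的最长子数组系列问题补1.py | GetMaxSubList
-- ===== SOURCE A (Python) =====
-- def GetMaxSubList(n, arr):
--     m = {0: -1}
--     a = ans = 0
--     for i in range(n):
--         if arr[i] > 0:
--             a += 1
--         elif arr[i] < 0:
--             a -= 1
--         if a not in m.keys():
--             m[a] = i
--         else:
--             ans = max(ans, i - m[a])
--     return ans
-- ===== SOURCE B (Python) =====
-- def GetMaxSubList(n, arr):
--     ps = [(0, 0)]
--     p = 0
--     for k in range(n):
--         v = arr[k]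
--         if v > 0:
--             p += 1
--         elif v < 0:
--             p -= 1
--         ps.append((p, k + 1))
--     ps.sort(key=lambda t: t[0])
--     ans = 0
--     cur, lo, hi = ps[0][0], ps[0][1], ps[0][1]
--     for v, j in ps[1:]:
--         if v != cur:
--             cur, lo, hi = v, j, j
--         else:
--             lo = min(lo, j)
--             hi = max(hi, j)
--             ans = max(ans, hi - lo)
--     return ans
-- ===== Notes on version B (the rewrite author's own statement) =====
-- stated objective: alternative
-- what changed: B builds the full list of (prefix sign-count, position) pairs, sorts it by count, and scans equal-count runs tracking the min and max position, instead of A's single-pass first-occurrence hashmap with a running maximum.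
import Mathlib
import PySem

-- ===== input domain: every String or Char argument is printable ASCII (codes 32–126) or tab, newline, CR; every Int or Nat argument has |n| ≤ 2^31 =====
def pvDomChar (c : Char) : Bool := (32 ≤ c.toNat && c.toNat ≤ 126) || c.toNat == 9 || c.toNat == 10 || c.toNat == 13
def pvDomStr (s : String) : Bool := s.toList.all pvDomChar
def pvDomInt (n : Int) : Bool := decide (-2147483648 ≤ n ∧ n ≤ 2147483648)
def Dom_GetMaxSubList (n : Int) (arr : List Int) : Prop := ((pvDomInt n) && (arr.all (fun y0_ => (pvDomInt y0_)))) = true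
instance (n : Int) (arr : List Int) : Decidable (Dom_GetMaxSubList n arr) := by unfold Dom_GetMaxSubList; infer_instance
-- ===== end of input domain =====

-- B builds the list of (prefix sign-count, position) pairs, sorts it by count and scans
-- equal-count runs tracking min/max position, instead of A's first-occurrence hashmap pass.

-- ===== PORT A =====
def stepA (arr : List Int) (st : PySem.Dict Int Int × Int × Int) (i : Int) :
    PySem.Dict Int Int × Int × Int :=
  let x := PySem.List.pyGetD arr i 0
  let a := if x > 0 then st.2.1 + 1 else if x < 0 then st.2.1 - 1 else st.2.1
  if st.1.contains a = false then (st.1.insert a i, a, st.2.2)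
  else (st.1, a, max st.2.2 (i - st.1.getD a 0))

def GetMaxSubList (n : Int) (arr : List Int) : Int :=
  ((PySem.List.pyRange 0 n 1).foldl (stepA arr)
    (((PySem.Dict.empty : PySem.Dict Int Int).insert 0 (-1)), 0, 0)).2.2

-- ===== PORT B =====
def buildStep (arr : List Int) (st : Int × List (Int × Int)) (i : Int) : Int × List (Int × Int) :=
  let v := PySem.List.pyGetD arr i 0
  let p := if v > 0 then st.1 + 1 else if v < 0 then st.1 - 1 else st.1
  (p, st.2 ++ [(p, i + 1)])

def scanStep (st : Int × Int × Int × Int) (e : Int × Int) : Int × Int × Int × Int :=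
  if e.1 ≠ st.1 then (e.1, e.2, e.2, st.2.2.2)
  else (st.1, min st.2.1 e.2, max st.2.2.1 e.2,
        max st.2.2.2 (max st.2.2.1 e.2 - min st.2.1 e.2))

def GetMaxSubList_alt (n : Int) (arr : List Int) : Int :=
  let ps := (PySem.List.pyRange 0 n 1).foldl (buildStep arr) (0, [(0, 0)])
  match PySem.List.sorted ps.2 (fun t => t.1) false with
  | [] => 0  -- unreachable: ps.2 is always nonempty (it starts as [(0, 0)])
  | h :: tl => (tl.foldl scanStep (h.1, h.2, h.2, 0)).2.2.2

-- ===== PRECONDITION & SPEC =====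
-- Pre_ excludes exactly n > len(arr), where A (and B alike) raise IndexError on arr[i].
def Pre_GetMaxSubList (n : Int) (arr : List Int) : Prop := n ≤ (arr.length : Int)
instance (n : Int) (arr : List Int) : Decidable (Pre_GetMaxSubList n arr) := by
  unfold Pre_GetMaxSubList; infer_instance

def pvWitness_GetMaxSubList : Int × List Int := (4, [1, -1, 0, 2])

def Spec_GetMaxSubList (n : Int) (arr : List Int) (out : Int) : Prop := out = GetMaxSubList_alt n arr
instance (n : Int) (arr : List Int) (out : Int) : Decidable (Spec_GetMaxSubList n arr out) := by
  unfold Spec_GetMaxSubList; infer_instance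

-- ===== CLAIM (what is proved, stated in full; the proofs are below) =====
def Claim_equal_GetMaxSubList : Prop := ∀ (n : Int) (arr : List Int), Dom_GetMaxSubList n arr → Pre_GetMaxSubList n arr → Spec_GetMaxSubList n arr (GetMaxSubList n arr)

-- ===== LEMMAS AND PROOFS =====

-- sign of an element, prefix sign-count, first index with a given prefix count
def sgn (x : Int) : Int := if x > 0 then 1 else if x < 0 then -1 else 0
def pfx (arr : List Int) (k : Nat) : Int := ((arr.take k).map sgn).sum
def firstK (arr : List Int) (v : Int) (t : Nat) : Option Nat :=
  (List.range t).find? (fun k => pfx arr k == v)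
-- lengths recorded by A up to step t, and by B's inner loop for start u within the first n' elements
def LA (arr : List Int) (t : Nat) : List Int :=
  (List.range t).filterMap
    (fun i => (firstK arr (pfx arr (i+1)) (i+1)).map (fun (k : Nat) => (i : Int) + 1 - (k : Int)))
def cands (arr : List Int) (n' u : Nat) : List Int :=
  (List.range (n' - u)).filterMap
    (fun s => if pfx arr (u + s + 1) = pfx arr u then some ((s : Int) + 1) else none)
def LB (arr : List Int) (n' : Nat) : List Int := (List.range n').flatMap (cands arr n')

lemma pfx_zero (arr : List Int) : pfx arr 0 = 0 := rfl

lemma pfx_succ (arr : List Int) (t : Nat) (ht : t < arr.length) :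
    pfx arr (t + 1) = pfx arr t + sgn (arr.getD t 0) := by
  have h1 : arr.take (t+1) = arr.take t ++ [arr[t]] := by
    rw [List.take_add_one, List.getElem?_eq_getElem ht, Option.toList_some]
  rw [pfx, h1, List.map_append, List.sum_append, List.getD_eq_getElem?_getD,
    List.getElem?_eq_getElem ht]
  simp [pfx]

lemma ifchain_eq_add_sgn (a x : Int) :
    (if x > 0 then a + 1 else if x < 0 then a - 1 else a) = a + sgn x := by
  simp only [sgn]; split_ifs <;> omega

lemma firstK_succ (arr : List Int) (v : Int) (t : Nat) :
    firstK arr v (t + 1) =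
      (firstK arr v t).or (if pfx arr t == v then some t else none) := by
  simp only [firstK, List.range_succ, List.find?_append, List.find?_cons, List.find?_nil]
  cases h : (pfx arr t == v) <;> simp

lemma firstK_some (arr : List Int) (v : Int) (t k : Nat) (h : firstK arr v t = some k) :
    k < t ∧ pfx arr k = v ∧ ∀ j < k, pfx arr j ≠ v := by
  rw [firstK, List.find?_eq_some_iff_getElem] at h
  obtain ⟨hp, i, hi, hik, hmin⟩ := h
  simp only [List.length_range] at hi
  rw [List.getElem_range] at hik
  subst hik
  refine ⟨hi, by simpa using hp, fun j hj hpj => ?_⟩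
  have := hmin j hj
  rw [List.getElem_range] at this
  simp [hpj] at this

lemma firstK_isSome (arr : List Int) (v : Int) (t k : Nat) (hk : k < t)
    (hv : pfx arr k = v) : (firstK arr v t).isSome := by
  rw [firstK, List.find?_isSome]
  exact ⟨k, List.mem_range.mpr hk, by simp [hv]⟩

-- ---- A's loop ----
def aState (arr : List Int) (t : Nat) : PySem.Dict Int Int × Int × Int :=
  (List.range t).foldl (fun st (k : Nat) => stepA arr st (k : Int))
    (((PySem.Dict.empty : PySem.Dict Int Int).insert 0 (-1)), 0, 0)

lemma aState_succ (arr : List Int) (t : Nat) :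
    aState arr (t + 1) = stepA arr (aState arr t) (t : Int) := by
  rw [aState, List.range_succ, List.foldl_append, List.foldl_cons, List.foldl_nil, aState]

lemma aState_inv (arr : List Int) (t : Nat) (ht : t ≤ arr.length) :
    (aState arr t).2.1 = pfx arr t ∧
    (∀ v : Int, (aState arr t).1.get? v = (firstK arr v (t+1)).map (fun (k : Nat) => (k : Int) - 1)) ∧
    (aState arr t).2.2 = (LA arr t).foldl max 0 := by
  induction t with
  | zero =>
    refine ⟨rfl, fun v => ?_, rfl⟩
    show ((PySem.Dict.empty : PySem.Dict Int Int).insert 0 (-1)).get? v = _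
    rw [PySem.Dict.get?_insert]
    by_cases hv : v = 0
    · simp [firstK, List.range_succ, pfx_zero, hv]
    · simp [firstK, List.range_succ, pfx_zero, hv, Ne.symm hv, PySem.Dict.get?_empty]
  | succ t ih =>
    have htl : t < arr.length := by omega
    obtain ⟨ha, hm, hans⟩ := ih (by omega)
    have hx : PySem.List.pyGetD arr (t : Int) 0 = arr.getD t 0 := PySem.List.pyGetD_natCast _ _ _
    rw [aState_succ]
    simp only [stepA, hx, ha, ifchain_eq_add_sgn, ← pfx_succ arr t htl]
    cases hF : firstK arr (pfx arr (t+1)) (t+1) with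
    | none =>
      have hc : (aState arr t).1.contains (pfx arr (t+1)) = false := by
        rw [PySem.Dict.contains_eq_isSome_get?, hm, hF]; rfl
      have hLA : LA arr (t+1) = LA arr t := by
        rw [LA, List.range_succ, List.filterMap_append, ← LA]
        simp [hF]
      simp only [hc, if_true]
      refine ⟨by trivial, fun v => ?_, by rw [hLA]; exact hans⟩
      rw [PySem.Dict.get?_insert, firstK_succ]
      by_cases hv : v = pfx arr (t+1)
      · subst hv
        rw [hF]
        simp only [Option.none_or, BEq.rfl, Option.map_some, if_true]
        congr 1
        push_cast
        ring
      · have hne : (pfx arr (t+1) == v) = false := by simp [Ne.symm hv]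
        rw [hne]
        simp only [Bool.false_eq_true, if_false, Option.or_none, if_neg hv, hm v]
    | some k =>
      have hc : (aState arr t).1.contains (pfx arr (t+1)) = true := by
        rw [PySem.Dict.contains_eq_isSome_get?, hm, hF]; rfl
      have hgd : (aState arr t).1.getD (pfx arr (t+1)) 0 = (k : Int) - 1 := by
        rw [PySem.Dict.getD_eq_get?_getD, hm, hF]; rfl
      have hLA : LA arr (t+1) = LA arr t ++ [(t : Int) + 1 - k] := by
        rw [LA, List.range_succ, List.filterMap_append, ← LA]
        simp [hF]
      simp only [hc, Bool.true_eq_false, if_false]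
      refine ⟨by trivial, fun v => ?_, ?_⟩
      · rw [firstK_succ]
        by_cases hv : v = pfx arr (t+1)
        · subst hv; rw [hF, hm _, hF]; rfl
        · have hne : (pfx arr (t+1) == v) = false := by simp [Ne.symm hv]
          rw [hne]
          simp only [Bool.false_eq_true, if_false, Option.or_none, hm v]
      · rw [hLA, List.foldl_append, List.foldl_cons, List.foldl_nil, ← hans, hgd]
        congr 1
        ring

lemma A_eq (n : Int) (arr : List Int) (pre : Pre_GetMaxSubList n arr) :
    GetMaxSubList n arr = (LA arr n.toNat).foldl max 0 := by
  have hn : n.toNat ≤ arr.length := by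
    unfold Pre_GetMaxSubList at pre; omega
  have h : GetMaxSubList n arr = (aState arr n.toNat).2.2 := by
    rw [GetMaxSubList, PySem.List.pyRange_one, List.foldl_map, aState]
    simp only [zero_add, sub_zero]
  rw [h, (aState_inv arr n.toNat hn).2.2]

-- ---- B's loops ----
def psList (arr : List Int) (t : Nat) : List (Int × Int) :=
  (List.range (t+1)).map (fun j => (pfx arr j, (j : Int)))

def bState (arr : List Int) (t : Nat) : Int × List (Int × Int) :=
  (List.range t).foldl (fun st (k : Nat) => buildStep arr st (k : Int)) (0, [(0, 0)])

lemma bState_succ (arr : List Int) (t : Nat) :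
    bState arr (t + 1) = buildStep arr (bState arr t) (t : Int) := by
  rw [bState, List.range_succ, List.foldl_append, List.foldl_cons, List.foldl_nil, bState]

lemma bState_eq (arr : List Int) (t : Nat) (ht : t ≤ arr.length) :
    bState arr t = (pfx arr t, psList arr t) := by
  induction t with
  | zero =>
    have : psList arr 0 = [(0, 0)] := by simp [psList, pfx_zero]
    rw [this]; rfl
  | succ t ih =>
    have htl : t < arr.length := by omega
    rw [bState_succ, ih (by omega)]
    simp only [buildStep, PySem.List.pyGetD_natCast, ifchain_eq_add_sgn,
      ← pfx_succ arr t htl]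
    have : psList arr (t + 1) = psList arr t ++ [(pfx arr (t+1), (t : Int) + 1)] := by
      rw [psList, List.range_succ, List.map_append, ← psList]
      rfl
    rw [this]

lemma mem_psList (arr : List Int) (t : Nat) (x : Int × Int) :
    x ∈ psList arr t ↔ ∃ j, j ≤ t ∧ x = (pfx arr j, (j : Int)) := by
  simp [psList, List.mem_map, List.mem_range, eq_comm]

lemma scan_inv (rest : List (Int × Int)) :
    ∀ (done : List (Int × Int)) (cur lo hi ans : Int)
      (_hpw : ∀ y ∈ done, ∀ z ∈ rest, y.1 ≤ z.1)
      (_hpw2 : (rest.map Prod.fst).Pairwise (· ≤ ·))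
      (_ha : ∀ y ∈ done, y.1 ≤ cur)
      (_hb : ∀ y ∈ done, y.1 = cur → lo ≤ y.2 ∧ y.2 ≤ hi)
      (_hc : ∃ y ∈ done, y.1 = cur ∧ y.2 = lo)
      (_hc' : ∃ y ∈ done, y.1 = cur ∧ y.2 = hi)
      (_hd : ∀ x ∈ done, ∀ y ∈ done, x.1 = y.1 → y.2 - x.2 ≤ ans)
      (_he : ans = 0 ∨ ∃ x ∈ done, ∃ y ∈ done, x.1 = y.1 ∧ ans = y.2 - x.2),
      (∀ x ∈ done ++ rest, ∀ y ∈ done ++ rest, x.1 = y.1 →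
          y.2 - x.2 ≤ (rest.foldl scanStep (cur, lo, hi, ans)).2.2.2) ∧
      ((rest.foldl scanStep (cur, lo, hi, ans)).2.2.2 = 0 ∨
        ∃ x ∈ done ++ rest, ∃ y ∈ done ++ rest, x.1 = y.1 ∧
          (rest.foldl scanStep (cur, lo, hi, ans)).2.2.2 = y.2 - x.2) := by
  induction rest with
  | nil =>
    intro done cur lo hi ans _ _ _ _ _ _ hd he
    simp only [List.append_nil, List.foldl_nil]
    exact ⟨hd, he⟩
  | cons z rest ih =>
    intro done cur lo hi ans hpw hpw2 ha hb hc hc' hd he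
    obtain ⟨w, hw, hwc, -⟩ := id hc
    have hans0 : 0 ≤ ans := by have := hd w hw w hw rfl; omega
    have hzrest : ∀ v ∈ rest, z.1 ≤ v.1 := by
      rw [List.map_cons, List.pairwise_cons] at hpw2
      intro v hv
      exact hpw2.1 v.1 (List.mem_map_of_mem hv)
    have hpw2' : (rest.map Prod.fst).Pairwise (· ≤ ·) := by
      rw [List.map_cons, List.pairwise_cons] at hpw2
      exact hpw2.2
    have hpw' : ∀ y ∈ done ++ [z], ∀ v ∈ rest, y.1 ≤ v.1 := by
      intro y hy v hv
      rcases List.mem_append.mp hy with hy | hy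
      · exact hpw y hy v (List.mem_cons_of_mem _ hv)
      · rw [List.mem_singleton.mp hy]; exact hzrest v hv
    rw [List.foldl_cons]
    by_cases hz : z.1 = cur
    · have hstep : scanStep (cur, lo, hi, ans) z
          = (cur, min lo z.2, max hi z.2, max ans (max hi z.2 - min lo z.2)) := by
        simp [scanStep, hz]
      rw [hstep]
      have H := ih (done ++ [z]) cur (min lo z.2) (max hi z.2)
        (max ans (max hi z.2 - min lo z.2)) hpw' hpw2'
        (by intro y hy
            rcases List.mem_append.mp hy with hy | hy
            · exact ha y hy
            · rw [List.mem_singleton.mp hy]; exact le_of_eq hz)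
        (by intro y hy hyc
            rcases List.mem_append.mp hy with hy | hy
            · obtain ⟨h1, h2⟩ := hb y hy hyc
              exact ⟨le_trans (min_le_left _ _) h1, le_trans h2 (le_max_left _ _)⟩
            · rw [List.mem_singleton.mp hy]
              exact ⟨min_le_right _ _, le_max_right _ _⟩)
        (by rcases le_total lo z.2 with h | h
            · obtain ⟨y, hy, hyc, hyl⟩ := hc
              exact ⟨y, List.mem_append_left _ hy, hyc, by rw [hyl, min_eq_left h]⟩
            · exact ⟨z, List.mem_append_right _ (List.mem_singleton_self z), hz,
                (min_eq_right h).symm⟩)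
        (by rcases le_total z.2 hi with h | h
            · obtain ⟨y, hy, hyc, hyh⟩ := hc'
              exact ⟨y, List.mem_append_left _ hy, hyc, by rw [hyh, max_eq_left h]⟩
            · exact ⟨z, List.mem_append_right _ (List.mem_singleton_self z), hz,
                (max_eq_right h).symm⟩)
        (by intro x hx y hy hxy
            rcases List.mem_append.mp hx with hx | hx <;>
              rcases List.mem_append.mp hy with hy | hy
            · exact le_trans (hd x hx y hy hxy) (le_max_left _ _)
            · rw [List.mem_singleton.mp hy]
              rw [List.mem_singleton.mp hy, hz] at hxy
              obtain ⟨h1, -⟩ := hb x hx hxy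
              have h2 : min lo z.2 ≤ x.2 := le_trans (min_le_left _ _) h1
              have h3 : z.2 ≤ max hi z.2 := le_max_right _ _
              calc z.2 - x.2 ≤ max hi z.2 - min lo z.2 := by omega
                _ ≤ _ := le_max_right _ _
            · rw [List.mem_singleton.mp hx] at hxy ⊢
              have hyc : y.1 = cur := by rw [← hxy, hz]
              obtain ⟨-, h2⟩ := hb y hy hyc
              have h1 : min lo z.2 ≤ z.2 := min_le_right _ _
              have h3 : y.2 ≤ max hi z.2 := le_trans h2 (le_max_left _ _)
              calc y.2 - z.2 ≤ max hi z.2 - min lo z.2 := by omega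
                _ ≤ _ := le_max_right _ _
            · rw [List.mem_singleton.mp hx, List.mem_singleton.mp hy]
              have : (0 : Int) ≤ max ans (max hi z.2 - min lo z.2) :=
                le_trans hans0 (le_max_left _ _)
              omega)
        (by rcases le_total (max hi z.2 - min lo z.2) ans with h | h
            · rw [max_eq_left h]
              rcases he with he | ⟨x, hx, y, hy, hxy, hv⟩
              · exact Or.inl he
              · exact Or.inr ⟨x, List.mem_append_left _ hx, y,
                  List.mem_append_left _ hy, hxy, hv⟩
            · rw [max_eq_right h]
              rcases le_total lo z.2 with h1 | h1 <;> rcases le_total z.2 hi with h2 | h2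
              · obtain ⟨xl, hxl, hxlc, hxll⟩ := hc
                obtain ⟨yh, hyh, hyhc, hyhh⟩ := hc'
                exact Or.inr ⟨xl, List.mem_append_left _ hxl, yh,
                  List.mem_append_left _ hyh, by rw [hxlc, hyhc],
                  by rw [min_eq_left h1, max_eq_left h2, hxll, hyhh]⟩
              · obtain ⟨xl, hxl, hxlc, hxll⟩ := hc
                exact Or.inr ⟨xl, List.mem_append_left _ hxl, z,
                  List.mem_append_right _ (List.mem_singleton_self z),
                  by rw [hxlc, hz],
                  by rw [min_eq_left h1, max_eq_right h2, hxll]⟩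
              · obtain ⟨yh, hyh, hyhc, hyhh⟩ := hc'
                exact Or.inr ⟨z, List.mem_append_right _ (List.mem_singleton_self z),
                  yh, List.mem_append_left _ hyh, by rw [hyhc, hz],
                  by rw [min_eq_right h1, max_eq_left h2, hyhh]⟩
              · exact Or.inr ⟨z, List.mem_append_right _ (List.mem_singleton_self z),
                  z, List.mem_append_right _ (List.mem_singleton_self z), rfl,
                  by rw [min_eq_right h1, max_eq_right h2]⟩)
      constructor
      · intro x hx y hy hxy
        refine H.1 x ?_ y ?_ hxy <;> simpa [List.append_assoc] using (by assumption : _ ∈ done ++ z :: rest)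
      · rcases H.2 with h0 | ⟨x, hx, y, hy, hxy, hv⟩
        · exact Or.inl h0
        · exact Or.inr ⟨x, by simpa [List.append_assoc] using hx, y,
            by simpa [List.append_assoc] using hy, hxy, hv⟩
    · have hstep : scanStep (cur, lo, hi, ans) z = (z.1, z.2, z.2, ans) := by
        simp [scanStep, hz]
      rw [hstep]
      have hcurz : cur < z.1 := by
        have h1 : cur ≤ z.1 := by
          have := hpw w hw z (List.mem_cons_self)
          rw [hwc] at this; exact this
        exact lt_of_le_of_ne h1 (fun h => hz h.symm)
      have hnotz : ∀ y ∈ done, y.1 ≠ z.1 := by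
        intro y hy h
        have := ha y hy
        omega
      have H := ih (done ++ [z]) z.1 z.2 z.2 ans hpw' hpw2'
        (by intro y hy
            rcases List.mem_append.mp hy with hy | hy
            · exact le_trans (ha y hy) (le_of_lt hcurz)
            · rw [List.mem_singleton.mp hy])
        (by intro y hy hyz
            rcases List.mem_append.mp hy with hy | hy
            · exact absurd hyz (hnotz y hy)
            · rw [List.mem_singleton.mp hy]; exact ⟨le_refl _, le_refl _⟩)
        ⟨z, List.mem_append_right _ (List.mem_singleton_self z), rfl, rfl⟩
        ⟨z, List.mem_append_right _ (List.mem_singleton_self z), rfl, rfl⟩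
        (by intro x hx y hy hxy
            rcases List.mem_append.mp hx with hx | hx <;>
              rcases List.mem_append.mp hy with hy | hy
            · exact hd x hx y hy hxy
            · rw [List.mem_singleton.mp hy] at hxy
              exact absurd hxy (hnotz x hx)
            · rw [List.mem_singleton.mp hx] at hxy
              exact absurd hxy.symm (hnotz y hy)
            · rw [List.mem_singleton.mp hx, List.mem_singleton.mp hy]
              omega)
        (by rcases he with he | ⟨x, hx, y, hy, hxy, hv⟩
            · exact Or.inl he
            · exact Or.inr ⟨x, List.mem_append_left _ hx, y,
                List.mem_append_left _ hy, hxy, hv⟩)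
      constructor
      · intro x hx y hy hxy
        refine H.1 x ?_ y ?_ hxy <;> simpa [List.append_assoc] using (by assumption : _ ∈ done ++ z :: rest)
      · rcases H.2 with h0 | ⟨x, hx, y, hy, hxy, hv⟩
        · exact Or.inl h0
        · exact Or.inr ⟨x, by simpa [List.append_assoc] using hx, y,
            by simpa [List.append_assoc] using hy, hxy, hv⟩

-- ---- max comparison ----
lemma foldl_max_zero_le (L : List Int) (b : Int) (h0 : 0 ≤ b) (hL : ∀ x ∈ L, x ≤ b) :
    L.foldl max 0 ≤ b := by
  rcases PySem.List.foldl_max_mem L 0 with h | h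
  · rw [h]; exact h0
  · exact hL _ h

lemma B_eq (n : Int) (arr : List Int) (pre : Pre_GetMaxSubList n arr) :
    GetMaxSubList_alt n arr = (LA arr n.toNat).foldl max 0 := by
  have hn : n.toNat ≤ arr.length := by
    unfold Pre_GetMaxSubList at pre; omega
  have hps : (PySem.List.pyRange 0 n 1).foldl (buildStep arr) (0, [(0, 0)])
      = (pfx arr n.toNat, psList arr n.toNat) := by
    rw [PySem.List.pyRange_one, List.foldl_map]
    simp only [zero_add, sub_zero]
    exact bState_eq arr n.toNat hn
  rw [GetMaxSubList_alt]
  simp only [hps]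
  set q := PySem.List.sorted (psList arr n.toNat) (fun t => t.1) false with hqdef
  have hqperm : q.Perm (psList arr n.toNat) := PySem.List.sorted_perm _ _ _
  have hqmem : ∀ (j : Nat), j ≤ n.toNat → (pfx arr j, (j : Int)) ∈ q := by
    intro j hj
    rw [hqperm.mem_iff, mem_psList]
    exact ⟨j, hj, rfl⟩
  have hqne : q ≠ [] := by
    rw [hqdef, Ne, PySem.List.sorted_eq_nil_iff]
    simp [psList]
  cases hq : q with
  | nil => exact absurd hq hqne
  | cons h tl =>
    have hpw : ((h :: tl).map Prod.fst).Pairwise (· ≤ ·) := by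
      rw [← hq, hqdef]
      exact PySem.List.sorted_map_key_pairwise _ _
    rw [List.map_cons, List.pairwise_cons] at hpw
    have H := scan_inv tl [h] h.1 h.2 h.2 0
      (by intro y hy z hz
          rw [List.mem_singleton.mp hy]
          exact hpw.1 z.1 (List.mem_map_of_mem hz))
      hpw.2
      (by intro y hy; rw [List.mem_singleton.mp hy])
      (by intro y hy _; rw [List.mem_singleton.mp hy]; exact ⟨le_refl _, le_refl _⟩)
      ⟨h, List.mem_singleton_self h, rfl, rfl⟩
      ⟨h, List.mem_singleton_self h, rfl, rfl⟩
      (by intro x hx y hy _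
          rw [List.mem_singleton.mp hx, List.mem_singleton.mp hy]
          omega)
      (Or.inl rfl)
    rw [List.singleton_append, ← hq] at H
    have hdq := H.1
    have heq := H.2
    have hmemq : ∀ x ∈ q, ∃ j, j ≤ n.toNat ∧ x = (pfx arr j, (j : Int)) := by
      intro x hx
      rw [hqperm.mem_iff, mem_psList] at hx
      exact hx
    rw [hq] at hdq heq
    show (tl.foldl scanStep (h.1, h.2, h.2, 0)).2.2.2 = (LA arr n.toNat).foldl max 0
    apply le_antisymm
    · -- res ≤ LA-max
      rcases heq with h0 | ⟨x, hx, y, hy, hxy, hv⟩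
      · rw [h0]; exact (PySem.List.le_foldl_max _ 0).1
      · rw [← hq] at hx hy
        obtain ⟨u, hu, hxu⟩ := hmemq x hx
        obtain ⟨j, hj, hyj⟩ := hmemq y hy
        rw [hxu, hyj] at hxy hv
        simp only at hxy hv
        by_cases hju : j ≤ u
        · have : (tl.foldl scanStep (h.1, h.2, h.2, 0)).2.2.2 ≤ 0 := by
            rw [hv]; omega
          exact le_trans this (PySem.List.le_foldl_max _ 0).1
        · have huj : u < j := by omega
          have hS : (firstK arr (pfx arr j) j).isSome :=
            firstK_isSome arr (pfx arr j) j u huj hxy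
          obtain ⟨k, hk⟩ := Option.isSome_iff_exists.mp hS
          obtain ⟨hkj, hpk, hmin⟩ := firstK_some arr _ _ _ hk
          have hku : k ≤ u := by
            by_contra hcon
            exact hmin u (by omega) hxy
          have hj1 : j - 1 + 1 = j := by omega
          have hmem : ((j - 1 : Nat) : Int) + 1 - (k : Int) ∈ LA arr n.toNat := by
            simp only [LA, List.mem_filterMap, List.mem_range, Option.map_eq_some_iff]
            refine ⟨j - 1, by omega, k, ?_, rfl⟩
            rw [hj1]
            exact hk
          have hle := (PySem.List.le_foldl_max (LA arr n.toNat) 0).2 _ hmem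
          rw [hv]
          have : (j : Int) - (u : Int) ≤ ((j - 1 : Nat) : Int) + 1 - (k : Int) := by
            push_cast [Nat.cast_sub (by omega : 1 ≤ j)]
            omega
          exact le_trans this hle
    · -- LA-max ≤ res
      apply foldl_max_zero_le
      · have hmem0 : ((0:Int), (0:Int)) ∈ q := by
          have := hqmem 0 (Nat.zero_le _)
          simpa [pfx_zero] using this
        rw [hq] at hmem0
        have := hdq _ hmem0 _ hmem0 rfl
        simpa using this
      · intro x hx
        simp only [LA, List.mem_filterMap, List.mem_range, Option.map_eq_some_iff] at hx
        obtain ⟨i, hi, k, hFk, hxk⟩ := hx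
        obtain ⟨hki, hpk, -⟩ := firstK_some arr _ _ _ hFk
        have hm1 : (pfx arr k, (k : Int)) ∈ q := hqmem k (by omega)
        have hm2 : (pfx arr (i+1), ((i+1 : Nat) : Int)) ∈ q := hqmem (i+1) (by omega)
        rw [hq] at hm1 hm2
        have := hdq _ hm1 _ hm2 (by simpa using hpk)
        simp only at this
        rw [← hxk]
        have hcast : (((i+1 : Nat) : Int)) = (i : Int) + 1 := by push_cast; ring
        rw [hcast] at this
        exact this

-- ===== VERDICT (by name: the statement is the Claim_ definition above) =====
theorem GetMaxSubList_spec : Claim_equal_GetMaxSubList := by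
  intro n arr _ pre
  unfold Spec_GetMaxSubList
  rw [A_eq n arr pre, B_eq n arr pre]
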